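-- pv_equiv track=rewrite | github.com/shadowkael/some_single_py | LintCode/3num_closet.py | threeNumClosest
-- ===== SOURCE A (Python) =====
-- def threeNumClosest(numbers, target):
--     # write your code here
--     if len(numbers) <= 3:
--         return sum(numbers)
--     max_num = max(numbers)
--     min_num = min(numbers)
--     abs_max_num = abs(max_num - target) if abs(max_num - target) > abs(min_num - target) else abs(min_num - target)
--     three_nums = []
--
--     def add_same_num(num):
--         if numbers.count(num) > 1:
--             while len(three_nums) < 3:
--                 three_nums.append(num)
--
--     for i in range(abs_max_num + 1):
--         if len(three_nums) >= 3:
--             return sum(three_nums)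
--         if target + i in numbers:
--             three_nums.append(target + i)
--             add_same_num(target + i)
--
--         if target - i in numbers:
--             three_nums.append(target - i)
--             add_same_num(target - i)
-- ===== SOURCE B (Python) =====
-- from collections import Counter
--
-- def threeNumClosest(numbers, target):
--     # One pass to count values, then a sorted scan over the distinct
--     # distances |v - target| instead of scanning every integer distance.
--     if len(numbers) <= 3:
--         return sum(numbers)
--     cnt = Counter(numbers)
--     dists = sorted({abs(v - target) for v in cnt})
--     total = 0
--     length = 0
--     for d in dists:
--         if length >= 3:
--             return total
--         for v in (target + d, target - d):
--             if v in cnt: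
--                 total += v
--                 length += 1
--                 if cnt[v] > 1 and length < 3:
--                     total += v * (3 - length)
--                     length = 3
--     return None
-- ===== Notes on version B (the rewrite author's own statement) =====
-- stated objective: faster
-- what changed: A scans every integer distance i in 0..max|v-target| testing list membership at each step; B builds a Counter once and makes a single pass over the sorted distinct distances actually present in the list, reproducing A's exact early-return/fill behaviour (including its None and double-count corners).
import Mathlib
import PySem

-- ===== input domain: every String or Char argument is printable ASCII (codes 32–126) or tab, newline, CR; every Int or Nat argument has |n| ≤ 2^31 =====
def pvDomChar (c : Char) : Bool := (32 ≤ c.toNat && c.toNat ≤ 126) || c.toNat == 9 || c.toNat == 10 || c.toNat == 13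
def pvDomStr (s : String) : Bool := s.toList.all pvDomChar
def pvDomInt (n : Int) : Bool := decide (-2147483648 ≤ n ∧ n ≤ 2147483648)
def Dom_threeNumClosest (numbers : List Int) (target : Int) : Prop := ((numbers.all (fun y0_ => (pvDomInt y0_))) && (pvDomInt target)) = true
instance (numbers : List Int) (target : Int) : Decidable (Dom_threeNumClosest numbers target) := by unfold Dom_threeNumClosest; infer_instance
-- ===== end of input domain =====

-- B replaces A's scan over every integer distance 0..max|v-target| (membership-testing the
-- whole list at each distance) by a count dict plus one pass over the sorted distinct
-- distances actually present; same return value on every input.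


-- ===== PORT A =====
-- the inner `while len(three_nums) < 3: three_nums.append(num)` loop
def pvFillLoopA (num : Int) (l : List Int) : List Int :=
  if l.length < 3 then pvFillLoopA num (l ++ [num]) else l
termination_by 3 - l.length
decreasing_by simp; omega

-- the helper `add_same_num`
def pvAddSameA (numbers : List Int) (num : Int) (l : List Int) : List Int :=
  if numbers.count num > 1 then pvFillLoopA num l else l

-- A's `for i in range(abs_max_num + 1)` loop, with the early `return sum(three_nums)`
-- rendered as stopping the recursion (so evaluation stops where Python's return does)
def pvLoopA (numbers : List Int) (target : Int) (absMax : Int) (i : Int) (l : List Int) :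
    Option Int :=
  if h : i < absMax + 1 then
    if 3 ≤ l.length then some l.sum
    else
      let l1 := if numbers.contains (target + i) then
                  pvAddSameA numbers (target + i) (l ++ [target + i]) else l
      let l2 := if numbers.contains (target - i) then
                  pvAddSameA numbers (target - i) (l1 ++ [target - i]) else l1
      pvLoopA numbers target absMax (i + 1) l2
  else none
termination_by (absMax + 1 - i).toNat
decreasing_by omega

def threeNumClosest (numbers : List Int) (target : Int) : Option Int :=
  if numbers.length ≤ 3 then some numbers.sum
  else
    match PySem.List.max? numbers (fun x => x), PySem.List.min? numbers (fun x => x) with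
    | some maxNum, some minNum =>
      let absMaxNum := if |maxNum - target| > |minNum - target| then |maxNum - target|
                       else |minNum - target|
      pvLoopA numbers target absMaxNum 0 []
    | _, _ => none  -- unreachable: numbers has length > 3 here, so max/min exist

-- ===== PORT B =====
-- B's inner `for v in (target + d, target - d)` body, on the state (total, length)
def pvEventB (cnt : PySem.Dict Int Int) (st : Int × Int) (v : Int) : Int × Int :=
  if cnt.contains v then
    let total := st.1 + v
    let length := st.2 + 1
    if cnt.getD v 0 > 1 ∧ length < 3 then (total + v * (3 - length), 3) else (total, length)
  else st

-- one iteration of B's `for d in dists` loop; `.error s` = early `return s`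
def pvStepB (cnt : PySem.Dict Int Int) (target : Int) (st : Except Int (Int × Int)) (d : Int) :
    Except Int (Int × Int) :=
  match st with
  | .error s => .error s
  | .ok tl =>
    if 3 ≤ tl.2 then .error tl.1
    else .ok (pvEventB cnt (pvEventB cnt tl (target + d)) (target - d))

def threeNumClosest_alt (numbers : List Int) (target : Int) : Option Int :=
  if numbers.length ≤ 3 then some numbers.sum
  else
    let cnt := PySem.Dict.counter numbers
    let dists := PySem.List.sorted
      (PySem.Set.ofList (cnt.keys.map (fun v => |v - target|))) (fun x => x)
    match dists.foldl (pvStepB cnt target) (.ok (0, 0)) with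
    | .error s => some s
    | .ok _ => none

-- ===== PRECONDITION & SPEC =====
def Spec_threeNumClosest (numbers : List Int) (target : Int) (out : Option Int) : Prop := out = threeNumClosest_alt numbers target
instance (numbers : List Int) (target : Int) (out : Option Int) : Decidable (Spec_threeNumClosest numbers target out) := by unfold Spec_threeNumClosest; infer_instance

-- ===== CLAIM (what is proved, stated in full; the proofs are below) =====
def Claim_equal_threeNumClosest : Prop := ∀ (numbers : List Int) (target : Int), Dom_threeNumClosest numbers target → Spec_threeNumClosest numbers target (threeNumClosest numbers target)

-- ===== LEMMAS AND PROOFS =====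

-- proof view of one iteration of A's loop as a fold step; `.error s` = early `return s`
def pvStepA (numbers : List Int) (target : Int) (st : Except Int (List Int)) (i : Int) :
    Except Int (List Int) :=
  match st with
  | .error s => .error s
  | .ok l =>
    if 3 ≤ l.length then .error l.sum
    else
      let l1 := if numbers.contains (target + i) then
                  pvAddSameA numbers (target + i) (l ++ [target + i]) else l
      let l2 := if numbers.contains (target - i) then
                  pvAddSameA numbers (target - i) (l1 ++ [target - i]) else l1
      .ok l2

theorem pvStepA_error (numbers : List Int) (target : Int) (s : Int) (R : List Int) :
    R.foldl (pvStepA numbers target) (.error s) = .error s := by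
  induction R with
  | nil => rfl
  | cons i R ih => simpa [pvStepA] using ih

-- the early-returning loop IS the fold of pvStepA over the remaining range
theorem pvLoopA_eq (numbers : List Int) (target absMax : Int) :
    ∀ (n : Nat) (i : Int) (l : List Int), (absMax + 1 - i).toNat = n →
    pvLoopA numbers target absMax i l =
      (match (PySem.List.pyRange i (absMax + 1)).foldl (pvStepA numbers target) (.ok l) with
        | .error s => some s | .ok _ => none) := by
  intro n
  induction n with
  | zero =>
    intro i l hn
    have hge : absMax + 1 ≤ i := by omega
    rw [pvLoopA, dif_neg (by omega), PySem.List.pyRange_one_eq_nil hge]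
    rfl
  | succ n ih =>
    intro i l hn
    have hlt : i < absMax + 1 := by omega
    rw [pvLoopA, dif_pos hlt, PySem.List.pyRange_one_cons hlt, List.foldl_cons]
    by_cases h3 : 3 ≤ l.length
    · rw [if_pos h3,
        show pvStepA numbers target (.ok l) i = .error l.sum by simp [pvStepA, h3],
        pvStepA_error]
    · rw [if_neg h3]
      rw [show pvStepA numbers target (.ok l) i = .ok
        (let l1 := if numbers.contains (target + i) then
                    pvAddSameA numbers (target + i) (l ++ [target + i]) else l
         if numbers.contains (target - i) then
            pvAddSameA numbers (target - i) (l1 ++ [target - i]) else l1)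
        by simp [pvStepA, h3]]
      exact ih (i + 1) _ (by omega)

-- a distance d at which A's loop body does something
def pvHasEvent (numbers : List Int) (target : Int) (d : Int) : Bool :=
  numbers.contains (target + d) || numbers.contains (target - d)

-- one event of A on the list state: append v, then add_same_num
def pvEventA (numbers : List Int) (v : Int) (l : List Int) : List Int :=
  if numbers.contains v then pvAddSameA numbers v (l ++ [v]) else l

-- B's state is A's list abstracted to (sum, length)
def pvAbstr (l : List Int) : Int × Int := (l.sum, (l.length : Int))

theorem pvFillLoopA_eq (num : Int) (l : List Int) :
    pvFillLoopA num l = l ++ List.replicate (3 - l.length) num := by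
  fun_induction pvFillLoopA num l with
  | case1 l h ih =>
    rw [ih]
    have h3 : 3 - l.length = (3 - (l ++ [num]).length) + 1 := by simp; omega
    rw [h3, List.replicate_succ]
    simp
  | case2 l h =>
    have h3 : 3 - l.length = 0 := by omega
    simp [h3]

theorem pvEventB_abstr (numbers : List Int) (v : Int) (l : List Int) :
    pvEventB (PySem.Dict.counter numbers) (pvAbstr l) v = pvAbstr (pvEventA numbers v l) := by
  unfold pvEventB pvEventA pvAddSameA pvAbstr
  rw [PySem.Dict.contains_counter, PySem.Dict.getD_counter]
  by_cases hc : numbers.contains v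
  · have hm : v ∈ numbers := by simpa using hc
    simp only [hc, if_true]
    by_cases hdup : 1 < numbers.count v
    · have hdup' : (1 : Int) < (numbers.count v : Int) := by exact_mod_cast hdup
      rw [pvFillLoopA_eq]
      by_cases hlen : (l.length : Int) + 1 < 3
      · have : (3 - (l ++ [v]).length) = 3 - (l.length + 1) := by simp
        simp only [gt_iff_lt, hdup', hlen, and_self, if_true, this, hdup]
        have hn : l.length + 1 < 3 := by exact_mod_cast hlen
        refine Prod.ext ?_ ?_
        · simp [List.sum_replicate]
          have h2 : ((2 - l.length : Nat) : Int) = 2 - (l.length : Int) := by omega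
          rw [h2]; ring
        · simp; omega
      · have h0 : 3 - (l ++ [v]).length = 0 := by simp; omega
        simp only [gt_iff_lt, hdup', hlen, and_false, if_false, h0, hdup]
        simp
    · have hdup' : ¬ (1 : Int) < (numbers.count v : Int) := by exact_mod_cast hdup
      simp only [gt_iff_lt, hdup', false_and, if_false, hdup, if_false]
      simp
  · have hm : v ∉ numbers := by simpa using hc
    simp [hm]

theorem pvStepB_error (cnt : PySem.Dict Int Int) (target : Int) (s : Int) (R : List Int) :
    R.foldl (pvStepB cnt target) (.error s) = .error s := by
  induction R with
  | nil => rfl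
  | cons i R ih => simpa [pvStepB] using ih

-- main correspondence: A's scan over all of R equals B's scan over the event distances of R,
-- provided the last element of R (if any) is an event distance
theorem pvMain (numbers : List Int) (target : Int) (R : List Int) (l : List Int)
    (hlast : ∀ (h : R ≠ []), pvHasEvent numbers target (R.getLast h) = true) :
    (match R.foldl (pvStepA numbers target) (.ok l) with
      | .error s => some s | .ok _ => (none : Option Int)) =
    (match (R.filter (pvHasEvent numbers target)).foldl
        (pvStepB (PySem.Dict.counter numbers) target) (.ok (pvAbstr l)) with
      | .error s => some s | .ok _ => none) := by
  induction R generalizing l with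
  | nil => simp
  | cons i R ih =>
    have hlast' : ∀ (h : R ≠ []), pvHasEvent numbers target (R.getLast h) = true := by
      intro h
      have := hlast (List.cons_ne_nil i R)
      rwa [List.getLast_cons h] at this
    by_cases h3 : 3 ≤ l.length
    · have h3' : (3 : Int) ≤ (l.length : Int) := by exact_mod_cast h3
      have hA : pvStepA numbers target (.ok l) i = .error l.sum := by simp [pvStepA, h3]
      rw [List.foldl_cons, hA, pvStepA_error]
      have hBerr : pvStepB (PySem.Dict.counter numbers) target (.ok (pvAbstr l)) i
          = .error l.sum := by simp [pvStepB, pvAbstr, h3']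
      by_cases hP : pvHasEvent numbers target i
      · rw [List.filter_cons_of_pos hP, List.foldl_cons, hBerr, pvStepB_error]
      · rw [List.filter_cons_of_neg (by simpa using hP)]
        have hRne : R ≠ [] := by
          intro hR; subst hR
          have := hlast (List.cons_ne_nil i [])
          simp at this
          exact hP (by simpa using this)
        have hmem : R.getLast hRne ∈ R.filter (pvHasEvent numbers target) :=
          List.mem_filter.mpr ⟨List.getLast_mem hRne, hlast' hRne⟩
        cases hF : R.filter (pvHasEvent numbers target) with
        | nil => rw [hF] at hmem; simp at hmem
        | cons d E =>
          rw [List.foldl_cons]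
          have hBerr' : pvStepB (PySem.Dict.counter numbers) target (.ok (pvAbstr l)) d
              = .error l.sum := by simp [pvStepB, pvAbstr, h3']
          rw [hBerr', pvStepB_error]
    · have h3' : ¬ (3 : Int) ≤ (l.length : Int) := by exact_mod_cast h3
      by_cases hP : pvHasEvent numbers target i
      · have hA : pvStepA numbers target (.ok l) i
            = .ok (pvEventA numbers (target - i) (pvEventA numbers (target + i) l)) := by
          simp only [pvStepA, pvEventA, if_neg h3]
        have hB : pvStepB (PySem.Dict.counter numbers) target (.ok (pvAbstr l)) i
            = .ok (pvAbstr (pvEventA numbers (target - i) (pvEventA numbers (target + i) l))) := by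
          simp only [pvStepB]
          rw [if_neg (by simpa [pvAbstr] using h3'), pvEventB_abstr, pvEventB_abstr]
        rw [List.foldl_cons, hA, List.filter_cons_of_pos hP, List.foldl_cons, hB]
        exact ih _ hlast'
      · simp only [pvHasEvent, Bool.or_eq_true, not_or] at hP
        have hm1 : target + i ∉ numbers := by simpa using hP.1
        have hm2 : target - i ∉ numbers := by simpa using hP.2
        have hA : pvStepA numbers target (.ok l) i = .ok l := by
          simp [pvStepA, if_neg h3, hm1, hm2]
        rw [List.foldl_cons, hA,
          List.filter_cons_of_neg (by simp [pvHasEvent, hm1, hm2])]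
        exact ih l hlast'

theorem pvAbsLe (numbers : List Int) (target mx mn : Int)
    (hub : ∀ v ∈ numbers, v ≤ mx) (hlb : ∀ v ∈ numbers, mn ≤ v)
    (v : Int) (hv : v ∈ numbers) :
    |v - target| ≤ (if |mx - target| > |mn - target| then |mx - target| else |mn - target|) := by
  have h1 := hub v hv
  have h2 := hlb v hv
  rcases abs_cases (v - target) with ⟨e1, _⟩ | ⟨e1, _⟩ <;>
    rcases abs_cases (mx - target) with ⟨e2, _⟩ | ⟨e2, _⟩ <;>
    rcases abs_cases (mn - target) with ⟨e3, _⟩ | ⟨e3, _⟩ <;>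
    split_ifs with hc <;> omega

-- B's sorted distinct-distance list is exactly the event distances of A's range
theorem pvFilterEq (numbers : List Int) (target mx mn : Int)
    (hub : ∀ v ∈ numbers, v ≤ mx) (hlb : ∀ v ∈ numbers, mn ≤ v) :
    PySem.List.sorted
      (PySem.Set.ofList ((PySem.Set.ofList numbers).map (fun v => |v - target|))) (fun x => x)
    = (PySem.List.pyRange 0
        ((if |mx - target| > |mn - target| then |mx - target| else |mn - target|) + 1)).filter
        (pvHasEvent numbers target) := by
  set M := if |mx - target| > |mn - target| then |mx - target| else |mn - target| with hM
  apply PySem.List.sorted_eq_of_perm_of_pairwise_lt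
  · rw [List.perm_ext_iff_of_nodup
      ((PySem.List.nodup_pyRange_one 0 (M + 1)).filter _) (PySem.Set.nodup_ofList _)]
    intro x
    rw [List.mem_filter, PySem.Set.mem_ofList, PySem.List.mem_pyRange_one]
    constructor
    · rintro ⟨⟨h0, hlt⟩, hP⟩
      simp only [pvHasEvent, Bool.or_eq_true, List.contains_iff_mem] at hP
      rcases hP with hmem | hmem
      · exact List.mem_map.mpr ⟨target + x, (PySem.Set.mem_ofList _ _).mpr hmem, by
          rw [show target + x - target = x by ring, abs_of_nonneg h0]⟩
      · exact List.mem_map.mpr ⟨target - x, (PySem.Set.mem_ofList _ _).mpr hmem, by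
          rw [show target - x - target = -x by ring, abs_neg, abs_of_nonneg h0]⟩
    · intro hx
      obtain ⟨v, hv, rfl⟩ := List.mem_map.mp hx
      rw [PySem.Set.mem_ofList] at hv
      have hle := pvAbsLe numbers target mx mn hub hlb v hv
      rw [← hM] at hle
      refine ⟨⟨abs_nonneg _, by omega⟩, ?_⟩
      simp only [pvHasEvent, Bool.or_eq_true, List.contains_iff_mem]
      rcases abs_cases (v - target) with ⟨e1, _⟩ | ⟨e1, _⟩
      · exact Or.inl (by rw [show target + |v - target| = v by omega]; exact hv)
      · exact Or.inr (by rw [show target - |v - target| = v by omega]; exact hv)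
  · exact (PySem.List.pairwise_lt_pyRange_one 0 (M + 1)).filter _

-- the largest distance (A's loop bound) is itself an event distance
theorem pvLastEvent (numbers : List Int) (target mx mn : Int)
    (hmx : mx ∈ numbers) (hmn : mn ∈ numbers) :
    pvHasEvent numbers target
      (if |mx - target| > |mn - target| then |mx - target| else |mn - target|) = true := by
  simp only [pvHasEvent, Bool.or_eq_true, List.contains_iff_mem]
  split_ifs with hc
  · rcases abs_cases (mx - target) with ⟨e, _⟩ | ⟨e, _⟩
    · exact Or.inl (by rw [show target + |mx - target| = mx by omega]; exact hmx)
    · exact Or.inr (by rw [show target - |mx - target| = mx by omega]; exact hmx)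
  · rcases abs_cases (mn - target) with ⟨e, _⟩ | ⟨e, _⟩
    · exact Or.inl (by rw [show target + |mn - target| = mn by omega]; exact hmn)
    · exact Or.inr (by rw [show target - |mn - target| = mn by omega]; exact hmn)

-- ===== VERDICT (by name: the statement is the Claim_ definition above) =====
theorem threeNumClosest_spec : Claim_equal_threeNumClosest := by
  intro numbers target _
  unfold Spec_threeNumClosest threeNumClosest threeNumClosest_alt
  by_cases hlen : numbers.length ≤ 3
  · simp [hlen]
  · simp only [if_neg hlen]
    have hne : numbers ≠ [] := by intro h; subst h; simp at hlen
    obtain ⟨mx, hmx⟩ : ∃ mx, PySem.List.max? numbers (fun x => x) = some mx := by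
      cases h : PySem.List.max? numbers (fun x => x) with
      | none => exact absurd ((PySem.List.max?_eq_none_iff _ _).mp h) hne
      | some m => exact ⟨m, rfl⟩
    obtain ⟨mn, hmn⟩ : ∃ mn, PySem.List.min? numbers (fun x => x) = some mn := by
      cases h : PySem.List.min? numbers (fun x => x) with
      | none => exact absurd ((PySem.List.min?_eq_none_iff _ _).mp h) hne
      | some m => exact ⟨m, rfl⟩
    rw [hmx, hmn]
    show pvLoopA numbers target
      (if |mx - target| > |mn - target| then |mx - target| else |mn - target|) 0 [] = _
    rw [pvLoopA_eq numbers target _ _ 0 [] rfl, PySem.Dict.keys_counter,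
      pvFilterEq numbers target mx mn
        (fun v hv => PySem.List.max?_isMax hmx v hv)
        (fun v hv => PySem.List.min?_isMin hmn v hv)]
    have hM0 : (0 : Int)
        ≤ if |mx - target| > |mn - target| then |mx - target| else |mn - target| := by
      split_ifs <;> exact abs_nonneg _
    have hlast : ∀ (h : PySem.List.pyRange 0
        ((if |mx - target| > |mn - target| then |mx - target| else |mn - target|) + 1) ≠ []),
        pvHasEvent numbers target ((PySem.List.pyRange 0
          ((if |mx - target| > |mn - target| then |mx - target| else |mn - target|) + 1)).getLast h)
          = true := by
      rw [PySem.List.pyRange_one_succ_right hM0]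
      intro h
      rw [List.getLast_concat]
      exact pvLastEvent numbers target mx mn (PySem.List.max?_mem hmx) (PySem.List.min?_mem hmn)
    exact pvMain numbers target _ [] hlast
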